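-- pv_equiv track=rewrite | github.com/Mar3eczek17/PythonStatements | LEVEL 1 PROBLEMS/1.py | old_macdonald
-- ===== SOURCE A (Python) =====
-- def old_macdonald(name):
--     out = []
--     for i in range(len(name)):
--         if i == 3:
--             out.append(name[i].upper())
--         elif i == 0:
--             out.append(name[i].capitalize())
--         else:
--             out.append(name[i])
--     return "".join(out)
-- ===== SOURCE B (Python) =====
-- def old_macdonald(name):
--     return (name[:1].upper()
--             + name[1:3]
--             + (name[3].upper() if len(name) > 3 else "")
--             + name[4:])
-- ===== Notes on version B (the rewrite author's own statement) =====
-- stated objective: simpler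
-- what changed: Replaces the per-index loop with branches on i==0/i==3 by a single closed-form concatenation of slices: name[:1].upper() + name[1:3] + (name[3].upper() if long enough) + name[4:].
import Mathlib
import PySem

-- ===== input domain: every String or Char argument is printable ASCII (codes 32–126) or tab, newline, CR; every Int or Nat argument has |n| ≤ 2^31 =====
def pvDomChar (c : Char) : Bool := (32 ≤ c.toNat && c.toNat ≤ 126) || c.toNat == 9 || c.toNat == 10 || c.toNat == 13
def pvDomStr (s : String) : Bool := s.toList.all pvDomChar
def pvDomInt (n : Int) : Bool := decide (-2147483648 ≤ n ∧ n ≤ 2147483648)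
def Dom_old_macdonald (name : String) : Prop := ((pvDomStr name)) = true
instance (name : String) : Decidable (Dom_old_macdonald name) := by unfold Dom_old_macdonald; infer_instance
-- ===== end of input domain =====

-- B builds the result by closed-form slice concatenation instead of A's per-index loop (same cost, simpler).

-- ===== PORT A =====
-- name[i].capitalize() and name[i].upper() on a ONE-character ASCII string are both exactly upperChar.
def old_macdonald (name : String) : String :=
  let cs := name.toList
  let out := (PySem.List.pyRange 0 (PySem.List.len cs)).foldl
    (fun (acc : List Char) (i : Int) =>
      if i = 3 then acc ++ [PySem.Chars.upperChar (PySem.List.pyGetD cs i ' ')]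
      else if i = 0 then acc ++ [PySem.Chars.upperChar (PySem.List.pyGetD cs i ' ')]
      else acc ++ [PySem.List.pyGetD cs i ' '])
    []
  String.ofList out

-- ===== PORT B =====
def old_macdonald_alt (name : String) : String :=
  let cs := name.toList
  String.ofList
    (PySem.Chars.upper (PySem.Chars.slice cs none (some 1))
     ++ PySem.Chars.slice cs (some 1) (some 3)
     ++ (if 3 < PySem.List.len cs then [PySem.Chars.upperChar (PySem.List.pyGetD cs 3 ' ')] else [])
     ++ PySem.Chars.slice cs (some 4) none)

-- ===== PRECONDITION & SPEC =====
def Spec_old_macdonald (name : String) (out : String) : Prop := out = old_macdonald_alt name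
instance (name : String) (out : String) : Decidable (Spec_old_macdonald name out) := by unfold Spec_old_macdonald; infer_instance

-- ===== CLAIM (what is proved, stated in full; the proofs are below) =====
def Claim_equal_old_macdonald : Prop := ∀ (name : String), Dom_old_macdonald name → Spec_old_macdonald name (old_macdonald name)

-- ===== LEMMAS AND PROOFS =====

-- A's index loop produces exactly B's slice concatenation, for any character list.
theorem om_lists (cs : List Char) :
    (PySem.List.pyRange 0 (PySem.List.len cs)).foldl
      (fun (acc : List Char) (i : Int) =>
        if i = 3 then acc ++ [PySem.Chars.upperChar (PySem.List.pyGetD cs i ' ')]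
        else if i = 0 then acc ++ [PySem.Chars.upperChar (PySem.List.pyGetD cs i ' ')]
        else acc ++ [PySem.List.pyGetD cs i ' ']) []
    = PySem.Chars.upper (PySem.Chars.slice cs none (some 1))
      ++ PySem.Chars.slice cs (some 1) (some 3)
      ++ (if 3 < PySem.List.len cs then [PySem.Chars.upperChar (PySem.List.pyGetD cs 3 ' ')] else [])
      ++ PySem.Chars.slice cs (some 4) none := by
  match cs with
  | [] => decide
  | [a] =>
    rw [show PySem.List.len [a] = 1 by simp,
        show PySem.List.pyRange 0 1 = [0] from by decide]
    simp [PySem.Chars.upper, PySem.List.pyGetD_zero_cons,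
          PySem.List.slice_toNat, PySem.List.slice_to, PySem.List.slice_from]
  | [a, b] =>
    rw [show PySem.List.len [a, b] = 2 by simp,
        show PySem.List.pyRange 0 2 = [0, 1] from by decide]
    simp [PySem.Chars.upper, PySem.List.pyGetD_zero_cons, PySem.List.pyGetD_ofNat',
          PySem.List.slice_toNat, PySem.List.slice_to, PySem.List.slice_from]
  | [a, b, c] =>
    rw [show PySem.List.len [a, b, c] = 3 by simp,
        show PySem.List.pyRange 0 3 = [0, 1, 2] from by decide]
    simp [PySem.Chars.upper, PySem.List.pyGetD_zero_cons, PySem.List.pyGetD_ofNat',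
          PySem.List.slice_toNat, PySem.List.slice_to, PySem.List.slice_from]
  | a :: b :: c :: d :: rest =>
    set cs' : List Char := a :: b :: c :: d :: rest with hcs
    have hlen : PySem.List.len cs' = ((rest.length : Int) + 4) := by
      simp [hcs]; ring
    have h0 : (0 : Int) < PySem.List.len cs' := by rw [hlen]; omega
    have tail : ∀ acc : List Char,
        (PySem.List.pyRange 4 ((cs'.length : Int))).foldl
          (fun (acc : List Char) (i : Int) =>
            if i = 3 then acc ++ [PySem.Chars.upperChar (PySem.List.pyGetD cs' i ' ')]
            else if i = 0 then acc ++ [PySem.Chars.upperChar (PySem.List.pyGetD cs' i ' ')]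
            else acc ++ [PySem.List.pyGetD cs' i ' ']) acc
        = acc ++ List.drop 4 cs' := by
      intro acc
      rw [PySem.List.foldl_congr_mem _ _ (fun acc (i : Int) => acc ++ [PySem.List.pyGetD cs' i ' ']) acc
          (by intro acc' x hx
              rw [PySem.List.mem_pyRange_one] at hx
              have hx3 : ¬ x = 3 := by omega
              have hx0 : ¬ x = 0 := by omega
              simp [hx3, hx0])]
      rw [PySem.List.foldl_pyRange_pyGetD' cs' ' ' (fun acc x => acc ++ [x]) acc (by norm_num : (0:Int) ≤ 4)]
      have hfold : ∀ (l acc' : List Char), List.foldl (fun acc x => acc ++ [x]) acc' l = acc' ++ l := by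
        intro l
        induction l with
        | nil => simp
        | cons x xs ih => intro acc'; simp [List.foldl_cons, ih]
      simp [hfold]
    rw [PySem.List.pyRange_one_cons h0]
    rw [PySem.List.pyRange_one_cons (by omega : (0:Int) + 1 < PySem.List.len cs')]
    rw [PySem.List.pyRange_one_cons (by omega : (0:Int) + 1 + 1 < PySem.List.len cs')]
    rw [PySem.List.pyRange_one_cons (by omega : (0:Int) + 1 + 1 + 1 < PySem.List.len cs')]
    norm_num [List.foldl_cons]
    rw [tail]
    simp [hcs, PySem.Chars.upper, PySem.List.slice_toNat, PySem.List.slice_to,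
          PySem.List.slice_from, PySem.List.pyGetD_ofNat']

-- ===== VERDICT (by name: the statement is the Claim_ definition above) =====
theorem old_macdonald_spec : Claim_equal_old_macdonald := by
  intro name _
  unfold Spec_old_macdonald old_macdonald old_macdonald_alt
  exact congrArg String.ofList (om_lists name.toList)
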